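-- pv_equiv track=rewrite | github.com/SuBinMok/CordingTest | 프로그래머스/0/181860. 빈 배열에 추가， 삭제하기/빈 배열에 추가， 삭제하기.py | solution
-- ===== SOURCE A (Python) =====
-- def solution(arr, flag):
--     answer = []
--     for i in range(len(flag)):
--         if flag[i] == True :
--             for _ in range(arr[i]*2):
--                 answer.append(arr[i])
--         else:
--             for _ in range(arr[i]):
--                 if len(answer) > 0:
--                     answer.pop()
--     return answer
-- ===== SOURCE B (Python) =====
-- def solution(arr, flag):
--     # Run-length-encoded stack: instead of materializing repeated elements,
--     # keep (value, count) runs; pops consume counts in O(1) amortized, and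
--     # the final answer is expanded from the surviving runs at the end.
--     runs = []  # stack of (value, count), top at the end
--     for x, f in zip(arr, flag):
--         if f:
--             if x > 0:
--                 runs.append((x, 2 * x))
--         else:
--             k = x
--             while runs and k > 0:
--                 v, c = runs[-1]
--                 if c <= k:
--                     runs.pop()
--                     k -= c
--                 else:
--                     runs[-1] = (v, c - k)
--                     k = 0
--     out = []
--     for v, c in runs:
--         out.extend([v] * c)
--     return out
-- ===== Notes on version B (the rewrite author's own statement) =====
-- stated objective: alternative
-- what changed: B never materializes the intermediate list: it simulates the operations on a run-length-encoded stack of (value, count) pairs, where a true flag pushes one run in O(1) and a false flag consumes counts from the top runs, expanding the surviving runs into the answer only at the end.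
import Mathlib
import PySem

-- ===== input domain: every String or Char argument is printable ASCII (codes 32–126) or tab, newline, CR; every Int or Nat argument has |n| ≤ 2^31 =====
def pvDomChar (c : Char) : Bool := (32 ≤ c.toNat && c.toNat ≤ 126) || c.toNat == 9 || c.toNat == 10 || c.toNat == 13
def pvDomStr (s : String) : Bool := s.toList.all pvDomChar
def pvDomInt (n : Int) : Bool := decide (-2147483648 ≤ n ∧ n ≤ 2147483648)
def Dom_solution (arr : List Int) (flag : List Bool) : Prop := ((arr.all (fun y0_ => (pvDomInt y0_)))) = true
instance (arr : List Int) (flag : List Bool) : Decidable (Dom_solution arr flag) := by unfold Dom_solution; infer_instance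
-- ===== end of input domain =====

-- B simulates the operations on a run-length-encoded stack of (value, count) pairs
-- instead of a materialized list, expanding the surviving runs only at the end (alternative algorithm).

-- ===== PORT A =====
def solution (arr : List Int) (flag : List Bool) : List Int :=
  (PySem.List.pyRange 0 flag.length 1).foldl
    (fun answer i =>
      if PySem.List.pyGetD flag i false = true then
        (PySem.List.pyRange 0 (PySem.List.pyGetD arr i 0 * 2) 1).foldl
          (fun acc _ => acc ++ [PySem.List.pyGetD arr i 0]) answer
      else
        (PySem.List.pyRange 0 (PySem.List.pyGetD arr i 0) 1).foldl
          (fun acc _ => if acc.length > 0 then acc.dropLast else acc) answer)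
    []

-- ===== PORT B =====
-- Source B keeps the run stack's TOP at the END of a Python list; the port keeps the top at the
-- HEAD (append ↦ cons, pop ↦ tail), so the final expansion walks runs.reverse — same runs,
-- same order of the expanded output.
def popRuns : List (Int × Int) → Int → List (Int × Int)
  | [], _ => []
  | (v, c) :: rest, k =>
      if k ≤ 0 then (v, c) :: rest
      else if c ≤ k then popRuns rest (k - c)
      else (v, c - k) :: rest

def solution_alt (arr : List Int) (flag : List Bool) : List Int :=
  ((arr.zip flag).foldl
    (fun runs xf =>
      if xf.2 then (if 0 < xf.1 then (xf.1, 2 * xf.1) :: runs else runs)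
      else popRuns runs xf.1) []).reverse.foldl
    (fun out vc => out ++ List.replicate vc.2.toNat vc.1) []

-- ===== PRECONDITION & SPEC =====
-- Pre_: Python A indexes arr[i] for every i < len(flag), so it raises IndexError iff flag is longer than arr.
def Pre_solution (arr : List Int) (flag : List Bool) : Prop := flag.length ≤ arr.length
instance (arr : List Int) (flag : List Bool) : Decidable (Pre_solution arr flag) := by unfold Pre_solution; infer_instance
def pvWitness_solution : List Int × List Bool := ([2, 1], [true, false])

def Spec_solution (arr : List Int) (flag : List Bool) (out : List Int) : Prop := out = solution_alt arr flag
instance (arr : List Int) (flag : List Bool) (out : List Int) : Decidable (Spec_solution arr flag out) := by unfold Spec_solution; infer_instance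

-- ===== CLAIM (what is proved, stated in full; the proofs are below) =====
def Claim_equal_solution : Prop := ∀ (arr : List Int) (flag : List Bool), Dom_solution arr flag → Pre_solution arr flag → Spec_solution arr flag (solution arr flag)

-- ===== LEMMAS AND PROOFS =====

-- the expansion of a run stack (top at head) into the concrete list it denotes
def expandRuns (runs : List (Int × Int)) : List Int :=
  runs.reverse.foldl (fun out vc => out ++ List.replicate vc.2.toNat vc.1) []

theorem expandRuns_nil : expandRuns [] = [] := rfl

theorem expandRuns_cons (v c : Int) (rest : List (Int × Int)) :
    expandRuns ((v, c) :: rest) = expandRuns rest ++ List.replicate c.toNat v := by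
  unfold expandRuns
  rw [List.reverse_cons, List.foldl_append]
  rfl

theorem solution_alt_eq_expand (arr : List Int) (flag : List Bool) :
    solution_alt arr flag
      = expandRuns ((arr.zip flag).foldl
          (fun runs xf =>
            if xf.2 then (if 0 < xf.1 then (xf.1, 2 * xf.1) :: runs else runs)
            else popRuns runs xf.1) []) := rfl

-- popRuns keeps all counts positive
theorem popRuns_good (runs : List (Int × Int)) (k : Int)
    (hg : ∀ vc ∈ runs, 0 < vc.2) : ∀ vc ∈ popRuns runs k, 0 < vc.2 := by
  induction runs generalizing k with
  | nil => simp [popRuns]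
  | cons vc rest ih =>
      obtain ⟨v, c⟩ := vc
      simp only [popRuns]
      split_ifs with h1 h2
      · exact hg
      · exact ih (k - c) (fun a ha => hg a (List.mem_cons_of_mem _ ha))
      · intro a ha
        rcases List.mem_cons.1 ha with h | h
        · subst h; simp only; omega
        · exact hg a (List.mem_cons_of_mem _ h)

-- popRuns truncates the denoted list exactly as k guarded pops do
theorem expand_popRuns (runs : List (Int × Int)) (k : Int)
    (hg : ∀ vc ∈ runs, 0 < vc.2) :
    expandRuns (popRuns runs k)
      = (expandRuns runs).take ((expandRuns runs).length - k.toNat) := by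
  induction runs generalizing k with
  | nil => simp [popRuns, expandRuns_nil]
  | cons vc rest ih =>
      obtain ⟨v, c⟩ := vc
      have hc : 0 < c := hg (v, c) (List.mem_cons_self ..)
      simp only [popRuns]
      split_ifs with h1 h2
      · have hk : k.toNat = 0 := by omega
        simp [hk]
      · rw [ih (k - c) (fun a ha => hg a (List.mem_cons_of_mem _ ha)), expandRuns_cons]
        have h3 : (expandRuns rest ++ List.replicate c.toNat v).length - k.toNat
            = (expandRuns rest).length - (k - c).toNat := by
          rw [List.length_append, List.length_replicate]; omega
        rw [h3, List.take_append_of_le_length (by omega)]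
      · rw [expandRuns_cons, expandRuns_cons]
        have hlen : (expandRuns rest).length + c.toNat - k.toNat
            = (expandRuns rest).length + (c.toNat - k.toNat) := by omega
        rw [List.length_append, List.length_replicate, hlen, List.take_append, List.take_replicate]
        congr 2
        · exact (List.take_of_length_le (by omega)).symm
        · omega

-- A's guarded pop loop drops one last element per iteration (while nonempty).
theorem popFold {α : Type} (l : List α) (ans : List Int) :
    l.foldl (fun acc _ => if acc.length > 0 then acc.dropLast else acc) ans
      = ans.take (ans.length - l.length) := by
  induction l generalizing ans with
  | nil => simp
  | cons a t ih =>
      simp only [List.foldl_cons]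
      rw [ih]
      by_cases h : ans.length > 0
      · rw [if_pos h, List.dropLast_eq_take, List.take_take, List.length_take]
        congr 1
        simp only [List.length_cons]
        omega
      · have hnil : ans = [] := by
          cases ans with
          | nil => rfl
          | cons _ _ => simp at h
        subst hnil; simp

-- one step of A (on the denoted list) equals the denotation of one step of B
theorem stepEq' (x : Int) (f : Bool) (runs : List (Int × Int))
    (hg : ∀ vc ∈ runs, 0 < vc.2) :
    (if f = true then
        (PySem.List.pyRange 0 (x * 2) 1).foldl (fun acc _ => acc ++ [x]) (expandRuns runs)
      else
        (PySem.List.pyRange 0 x 1).foldl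
          (fun acc _ => if acc.length > 0 then acc.dropLast else acc) (expandRuns runs))
      = expandRuns (if f then (if 0 < x then (x, 2 * x) :: runs else runs)
                    else popRuns runs x) := by
  cases f with
  | true =>
      simp only [if_pos]
      rw [PySem.List.foldl_append_singleton_eq_map (f := fun _ => x)]
      by_cases hx : 0 < x
      · rw [if_pos hx, expandRuns_cons]
        congr 1
        rw [List.map_const', PySem.List.length_pyRange_one]
        congr 1
        omega
      · rw [if_neg hx]
        have : (x * 2).toNat = 0 := by omega
        rw [List.map_const', PySem.List.length_pyRange_one]
        simp [this]
  | false =>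
      simp only [Bool.false_eq_true, if_false]
      rw [popFold, PySem.List.length_pyRange_one, expand_popRuns runs x hg]
      congr 2
      omega

-- shifting: A's fold over indices 1..n+1 on cons lists is its fold over 0..n on the tails
theorem shiftFold (x : Int) (f : Bool) (arr : List Int) (flag : List Bool)
    (g : List Int → Bool → Int → List Int)
    (ans : List Int) (n : Nat) :
    (PySem.List.pyRange 1 ((n : Int) + 1) 1).foldl
        (fun acc i => g acc (PySem.List.pyGetD (f :: flag) i false) (PySem.List.pyGetD (x :: arr) i 0)) ans
      = (PySem.List.pyRange 0 (n : Int) 1).foldl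
        (fun acc i => g acc (PySem.List.pyGetD flag i false) (PySem.List.pyGetD arr i 0)) ans := by
  rw [PySem.List.pyRange_one 1, PySem.List.pyRange_one 0]
  simp only [add_sub_cancel_right, sub_zero, Int.toNat_natCast, List.foldl_map]
  congr 1
  funext acc k
  have h1 : (1 : Int) + (k : Int) = ((k + 1 : Nat) : Int) := by omega
  have h0 : (0 : Int) + (k : Int) = ((k : Nat) : Int) := by omega
  rw [h1, h0, PySem.List.pyGetD_natCast, PySem.List.pyGetD_natCast,
      PySem.List.pyGetD_natCast, PySem.List.pyGetD_natCast]
  simp [List.getD]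

theorem mainFold (flag : List Bool) (arr : List Int) (runs : List (Int × Int))
    (h : flag.length ≤ arr.length) (hg : ∀ vc ∈ runs, 0 < vc.2) :
    (PySem.List.pyRange 0 flag.length 1).foldl
      (fun answer i =>
        if PySem.List.pyGetD flag i false = true then
          (PySem.List.pyRange 0 (PySem.List.pyGetD arr i 0 * 2) 1).foldl
            (fun acc _ => acc ++ [PySem.List.pyGetD arr i 0]) answer
        else
          (PySem.List.pyRange 0 (PySem.List.pyGetD arr i 0) 1).foldl
            (fun acc _ => if acc.length > 0 then acc.dropLast else acc) answer) (expandRuns runs)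
    = expandRuns ((arr.zip flag).foldl
        (fun runs xf =>
          if xf.2 then (if 0 < xf.1 then (xf.1, 2 * xf.1) :: runs else runs)
          else popRuns runs xf.1) runs) := by
  induction flag generalizing arr runs with
  | nil => simp [PySem.List.pyRange_one_eq_nil]
  | cons f fs ih =>
      cases arr with
      | nil => simp at h
      | cons x xs =>
          have hlen : fs.length ≤ xs.length := by simpa using h
          have hpos : (0 : Int) < ((f :: fs).length : Int) := by simp
          rw [PySem.List.pyRange_one_cons hpos, List.foldl_cons]
          have hn : ((f :: fs).length : Int) = ((fs.length : Int) + 1) := by simp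
          rw [hn]
          simp only [zero_add]
          rw [shiftFold x f xs fs
            (fun acc fb xv =>
              if fb = true then
                (PySem.List.pyRange 0 (xv * 2) 1).foldl (fun a _ => a ++ [xv]) acc
              else
                (PySem.List.pyRange 0 xv 1).foldl
                  (fun a _ => if a.length > 0 then a.dropLast else a) acc)]
          simp only [PySem.List.pyGetD_zero_cons]
          rw [stepEq' x f runs hg]
          set runs' := (if f then (if 0 < x then (x, 2 * x) :: runs else runs)
                        else popRuns runs x) with hruns'
          have hg' : ∀ vc ∈ runs', 0 < vc.2 := by
            rw [hruns']
            cases f with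
            | true =>
                rw [if_pos rfl]
                by_cases hx : 0 < x
                · rw [if_pos hx]
                  intro a ha
                  rcases List.mem_cons.1 ha with hh | hh
                  · subst hh; simp only; omega
                  · exact hg a hh
                · rw [if_neg hx]; exact hg
            | false => simpa using popRuns_good runs x hg
          rw [ih xs runs' hlen hg']
          simp only [List.zip_cons_cons, List.foldl_cons]
          rw [← hruns']

-- ===== VERDICT (by name: the statement is the Claim_ definition above) =====
theorem solution_spec : Claim_equal_solution := by
  intro arr flag _ hpre
  unfold Spec_solution solution
  rw [solution_alt_eq_expand]
  have := mainFold flag arr [] hpre (by simp)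
  simpa [expandRuns_nil] using this
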